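-- pv_equiv track=rewrite | github.com/Toney823/YXK_Usefull_Tools | gffExtractor.py | gffblocker
-- ===== SOURCE A (Python) =====
-- def gffblocker(lines: list):
--     file_blocks = []
--     block = []
--     for line in lines:
--         if len(line) == 0:
--             continue
--         if line.split('\t')[2] == 'gene':#startswith(separator_first):
--             if len(block) > 0:
--                 file_blocks.append(block)
--             block = [line]
--             continue
--         block.append(line)
--     if len(block) > 0:
--         file_blocks.append(block)
--     return file_blocks
-- ===== SOURCE B (Python) =====
-- def gffblocker(lines: list):
--     # staged: filter empties, find gene cut positions, slice between cuts
--     kept = [line for line in lines if len(line) > 0]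
--     cuts = [i for i, line in enumerate(kept) if line.split('\t')[2] == 'gene']
--     bounds = [0] + cuts + [len(kept)]
--     return [kept[a:b] for a, b in zip(bounds, bounds[1:]) if a < b]
-- ===== Notes on version B (the rewrite author's own statement) =====
-- stated objective: alternative
-- what changed: B replaces A's single accumulator loop by three staged passes: filter out empty lines, collect the indices of 'gene' lines via enumerate, then emit the blocks as non-empty slices between consecutive cut positions.
import Mathlib
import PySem

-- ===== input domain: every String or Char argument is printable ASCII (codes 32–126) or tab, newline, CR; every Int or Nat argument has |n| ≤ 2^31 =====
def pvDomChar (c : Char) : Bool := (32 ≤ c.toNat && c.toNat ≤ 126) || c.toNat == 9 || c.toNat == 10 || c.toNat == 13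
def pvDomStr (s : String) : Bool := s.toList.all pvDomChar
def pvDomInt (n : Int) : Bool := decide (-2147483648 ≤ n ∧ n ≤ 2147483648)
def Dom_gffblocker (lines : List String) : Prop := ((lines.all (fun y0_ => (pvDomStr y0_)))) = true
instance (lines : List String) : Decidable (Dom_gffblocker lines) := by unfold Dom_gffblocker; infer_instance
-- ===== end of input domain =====

-- B replaces A's accumulator loop by staged passes (filter empties, collect gene cut
-- indices with enumerate, slice between consecutive cuts); return values proved equal on Pre_.

-- shared gene test: line.split('\t')[2] == 'gene' (totalised with ""; Pre_ keeps inputs where the index is in range)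
def pvIsGene (line : String) : Bool :=
  (PySem.List.pyGet? ((PySem.Str.split? line "\t").getD []) 2).getD "" == "gene"

-- ===== PORT A =====
def pvStepA (st : List (List String) × List String) (line : String) :
    List (List String) × List String :=
  if PySem.Str.len line == 0 then st
  else if pvIsGene line then
    ((if st.2.length > 0 then st.1 ++ [st.2] else st.1), [line])
  else (st.1, st.2 ++ [line])

def gffblocker (lines : List String) : List (List String) :=
  let r := lines.foldl pvStepA (([] : List (List String)), ([] : List String))
  if r.2.length > 0 then r.1 ++ [r.2] else r.1

-- ===== PORT B =====
def gffblocker_alt (lines : List String) : List (List String) :=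
  let kept := lines.filter (fun line => decide ((0 : Int) < PySem.Str.len line))
  let cuts := ((PySem.List.enumerate kept).filter (fun p => pvIsGene p.2)).map (fun p => p.1)
  let bounds := (0 : Int) :: (cuts ++ [(kept.length : Int)])
  ((bounds.zip bounds.tail).filter (fun p => decide (p.1 < p.2))).map
    (fun p => PySem.List.slice kept (some p.1) (some p.2))

-- ===== PRECONDITION & SPEC =====
-- Pre_ excludes exactly the inputs on which Python A raises IndexError:
-- a non-empty line with fewer than three tab-separated fields.
def Pre_gffblocker (lines : List String) : Prop :=
  ∀ l ∈ lines, ¬ (PySem.Str.len l == 0) = true → 3 ≤ ((PySem.Str.split? l "\t").getD []).length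
instance (lines : List String) : Decidable (Pre_gffblocker lines) := by
  unfold Pre_gffblocker; infer_instance
def pvWitness_gffblocker : List String := ["x\ty\tgene", "a\tb\tmRNA", ""]

def Spec_gffblocker (lines : List String) (out : List (List String)) : Prop := out = gffblocker_alt lines
instance (lines : List String) (out : List (List String)) : Decidable (Spec_gffblocker lines out) := by unfold Spec_gffblocker; infer_instance

-- ===== CLAIM (what is proved, stated in full; the proofs are below) =====
def Claim_equal_gffblocker : Prop := ∀ (lines : List String), Dom_gffblocker lines → Pre_gffblocker lines → Spec_gffblocker lines (gffblocker lines)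

-- ===== LEMMAS AND PROOFS =====

-- recursive characterisation of A's loop (with the empty-line skip)
def pvAgrp (block : List String) : List String → List (List String)
  | [] => if block.length > 0 then [block] else []
  | l :: ls =>
    if PySem.Str.len l == 0 then pvAgrp block ls
    else if pvIsGene l then (if block.length > 0 then [block] else []) ++ pvAgrp [l] ls
    else pvAgrp (block ++ [l]) ls

-- same grouping on the empties-filtered list (no skip)
def pvAgrp' (block : List String) : List String → List (List String)
  | [] => if block.length > 0 then [block] else []
  | l :: ls =>
    if pvIsGene l then (if block.length > 0 then [block] else []) ++ pvAgrp' [l] ls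
    else pvAgrp' (block ++ [l]) ls

-- gene cut positions starting at index s (proof-side form of B's enumerate/filter/map)
def pvCutsFrom (s : Int) : List String → List Int
  | [] => []
  | l :: ls => (if pvIsGene l then [s] else []) ++ pvCutsFrom (s + 1) ls

-- slices between consecutive bounds, keeping non-empty ones (proof-side form of B's zip pass)
def pvChop (ys : List String) (a : Int) : List Int → List (List String)
  | [] => []
  | b :: rest =>
    (if a < b then [PySem.List.slice ys (some a) (some b)] else []) ++ pvChop ys b rest

theorem pvA_foldl (xs : List String) : ∀ (fb : List (List String)) (block : List String),
    (let r := xs.foldl pvStepA (fb, block);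
     if r.2.length > 0 then r.1 ++ [r.2] else r.1) = fb ++ pvAgrp block xs := by
  induction xs with
  | nil =>
    intro fb block
    simp only [List.foldl_nil, pvAgrp]
    split_ifs <;> simp
  | cons l ls ih =>
    intro fb block
    simp only [List.foldl_cons, pvAgrp, pvStepA]
    by_cases h0 : l = ""
    · simp [h0, ih]
    · by_cases hg : pvIsGene l = true
      · by_cases hb : block.length > 0
        · simp [h0, hg, hb, ih, List.append_assoc]
        · simp [h0, hg, hb, ih]
      · simp [h0, hg, ih]

theorem pvAgrp_filter (xs : List String) : ∀ (block : List String),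
    pvAgrp block xs = pvAgrp' block (xs.filter (fun l => !(PySem.Str.len l == 0))) := by
  induction xs with
  | nil => intro block; simp [pvAgrp, pvAgrp']
  | cons l ls ih =>
    intro block
    by_cases h0 : l = ""
    · simp [pvAgrp, h0, ih]
    · simp [pvAgrp, pvAgrp', h0, ih]

theorem pvCuts_enum (xs : List String) : ∀ (s : Int),
    ((PySem.List.enumerate xs s).filter (fun p => pvIsGene p.2)).map (fun p => p.1)
      = pvCutsFrom s xs := by
  induction xs with
  | nil => intro s; simp [PySem.List.enumerate_nil, pvCutsFrom]
  | cons l ls ih =>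
    intro s
    rw [PySem.List.enumerate_cons]
    by_cases hg : pvIsGene l = true
    · simp [hg, pvCutsFrom, ih]
    · simp [hg, pvCutsFrom, ih]

theorem pvZip_chop (ys : List String) (L : List Int) : ∀ (a : Int),
    (((a :: L).zip L).filter (fun p => decide (p.1 < p.2))).map
      (fun p => PySem.List.slice ys (some p.1) (some p.2)) = pvChop ys a L := by
  induction L with
  | nil => intro a; simp [pvChop]
  | cons b rest ih =>
    intro a
    by_cases hab : a < b
    · simp [List.zip_cons_cons, hab, pvChop, ih]
    · simp [List.zip_cons_cons, hab, pvChop, ih]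

-- the main invariant: chopping the full list from offset m at the gene cuts of the tail
-- equals A's grouping of the tail with 'block' as the open block
theorem pvMain (ls : List String) : ∀ (full block : List String) (m : Nat),
    block ≠ [] → full.drop m = block ++ ls →
    pvChop full (m : Int) (pvCutsFrom ((m : Int) + block.length) ls ++ [(full.length : Int)])
      = pvAgrp' block ls := by
  induction ls with
  | nil =>
    intro full block m hb hdrop
    have hbl := List.length_pos_of_ne_nil hb
    have hlen : full.length = m + block.length := by
      have := congrArg List.length hdrop
      simp [List.length_drop] at this
      omega
    have hm : m < full.length := by omega
    simp only [pvCutsFrom, List.nil_append, pvChop]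
    have hlt : (m : Int) < (full.length : Int) := by exact_mod_cast hm
    rw [if_pos hlt]
    have hslice : PySem.List.slice full (some (m : Int)) (some (full.length : Int))
        = block := by
      rw [PySem.List.slice_natCast, hdrop]
      simp [hlen]
    simp [hslice, pvAgrp', hbl]
  | cons l ls ih =>
    intro full block m hb hdrop
    have hbl := List.length_pos_of_ne_nil hb
    by_cases hg : pvIsGene l = true
    · simp only [pvCutsFrom, hg, if_pos, List.cons_append, pvChop,
        List.nil_append]
      have hab : (m : Int) < (m : Int) + block.length := by omega
      rw [if_pos hab]
      have hslice : PySem.List.slice full (some (m : Int)) (some ((m : Int) + block.length))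
          = block := by
        have hc : ((m : Int) + block.length) = ((m + block.length : Nat) : Int) := by push_cast; ring
        rw [hc, PySem.List.slice_natCast, hdrop]
        simp
      have hdrop' : full.drop (m + block.length) = [l] ++ ls := by
        rw [← List.drop_drop, hdrop]; simp
      have h := ih full [l] (m + block.length) (by simp) hdrop'
      have hcast : ((m + block.length : Nat) : Int) = (m : Int) + block.length := by push_cast; ring
      rw [hcast] at h
      norm_num at h
      rw [hslice]
      simp only [pvAgrp', hg, if_pos, List.singleton_append]
      rw [if_pos hbl]
      simp only [List.cons_append, List.nil_append]
      rw [h]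
    · simp only [pvCutsFrom, hg]
      have hdrop' : full.drop m = (block ++ [l]) ++ ls := by rw [hdrop]; simp
      have h := ih full (block ++ [l]) m (by simp) hdrop'
      have hcast : (m : Int) + ((block ++ [l]).length : Int) = (m : Int) + block.length + 1 := by
        simp; omega
      rw [hcast] at h
      simp only [Bool.false_eq_true, if_false, List.nil_append]
      rw [h]
      simp [pvAgrp', hg]

theorem pvTop (ys : List String) :
    pvChop ys 0 (pvCutsFrom 0 ys ++ [(ys.length : Int)]) = pvAgrp' [] ys := by
  cases ys with
  | nil => simp [pvCutsFrom, pvChop, pvAgrp']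
  | cons l ls =>
    have hdrop : (l :: ls).drop 0 = [l] ++ ls := by simp
    have h := pvMain ls (l :: ls) [l] 0 (by simp) hdrop
    norm_num at h
    by_cases hg : pvIsGene l = true
    · simp only [pvCutsFrom, hg, if_pos, List.cons_append, pvChop]
      rw [if_neg (by omega)]
      simp only [List.nil_append, List.length_cons]
      push_cast
      rw [h]
      simp [pvAgrp', hg]
    · simp only [pvCutsFrom, hg, Bool.false_eq_true, if_false, List.nil_append,
        List.length_cons]
      push_cast
      rw [h]
      simp [pvAgrp', hg]

-- the two Boolean keep-tests agree (len is the non-negative length)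
theorem pvFilter_eq (xs : List String) :
    xs.filter (fun line => decide ((0 : Int) < PySem.Str.len line))
      = xs.filter (fun l => !(PySem.Str.len l == 0)) := by
  apply List.filter_congr
  intro l _
  by_cases h0 : l.length = 0
  · simp [PySem.Str.len_eq, h0]
  · simp [PySem.Str.len_eq, h0, Nat.pos_of_ne_zero h0, Int.natCast_eq_zero]

-- ===== VERDICT (by name: the statement is the Claim_ definition above) =====
theorem gffblocker_spec : Claim_equal_gffblocker := by
  intro lines _ _
  unfold Spec_gffblocker gffblocker
  have hA := pvA_foldl lines [] []
  simp only [List.nil_append] at hA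
  rw [hA, pvAgrp_filter]
  simp only [gffblocker_alt, List.tail_cons]
  rw [pvFilter_eq, pvCuts_enum, pvZip_chop, pvTop]
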